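-- pv_equiv track=rewrite | github.com/harryhazza77/aws-safe-mcp | src/aws_safe_mcp/tools/lambda_tools.py | _summary_verdict
-- ===== SOURCE A (Python) =====
-- from typing import Any
--
-- def _summary_verdict(verdicts: Any) -> str:
--     values = list(verdicts)
--     if not values:
--         return "no"
--     if all(value == "reachable" for value in values):
--         return "yes"
--     if all(value == "blocked" for value in values):
--         return "no"
--     if any(value == "unknown" for value in values):
--         return "unknown"
--     return "partial"
-- ===== SOURCE B (Python) =====
-- def _summary_verdict(verdicts) -> str:
--     total = reachable = blocked = unknown = 0
--     for value in verdicts: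
--         total += 1
--         if value == "reachable":
--             reachable += 1
--         elif value == "blocked":
--             blocked += 1
--         elif value == "unknown":
--             unknown += 1
--     if total == 0:
--         return "no"
--     if reachable == total:
--         return "yes"
--     if blocked == total:
--         return "no"
--     if unknown > 0:
--         return "unknown"
--     return "partial"
-- ===== Notes on version B (the rewrite author's own statement) =====
-- stated objective: alternative
-- what changed: Replaced A's four separate all()/any() scans over the list with a single tally pass accumulating total/reachable/blocked/unknown counters followed by a branch-only classification.
import Mathlib
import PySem

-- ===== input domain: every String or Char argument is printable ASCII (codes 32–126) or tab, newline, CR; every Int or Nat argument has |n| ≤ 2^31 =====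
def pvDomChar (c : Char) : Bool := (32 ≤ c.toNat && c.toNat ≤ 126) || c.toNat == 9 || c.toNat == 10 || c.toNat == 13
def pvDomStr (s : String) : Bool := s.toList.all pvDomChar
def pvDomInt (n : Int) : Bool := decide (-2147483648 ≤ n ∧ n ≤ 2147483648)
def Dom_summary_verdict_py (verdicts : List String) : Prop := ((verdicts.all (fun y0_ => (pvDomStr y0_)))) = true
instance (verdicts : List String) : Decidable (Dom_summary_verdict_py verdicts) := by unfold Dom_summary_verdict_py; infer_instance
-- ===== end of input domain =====

-- ===== PORT A =====
-- B changes the decomposition only: one counting pass, then branch-only classification (no speed claim).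
def summary_verdict_py (verdicts : List String) : String :=
  let values := verdicts
  if values.isEmpty then "no"
  else if values.all (fun value => value == "reachable") then "yes"
  else if values.all (fun value => value == "blocked") then "no"
  else if values.any (fun value => value == "unknown") then "unknown"
  else "partial"

-- ===== PORT B =====
-- the tally loop of Source B: state = (total, reachable, blocked, unknown)
def svTallyGo : List String → Nat × Nat × Nat × Nat → Nat × Nat × Nat × Nat
  | [], s => s
  | value :: rest, (t, r, b, u) =>
    if value == "reachable" then svTallyGo rest (t + 1, r + 1, b, u)
    else if value == "blocked" then svTallyGo rest (t + 1, r, b + 1, u)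
    else if value == "unknown" then svTallyGo rest (t + 1, r, b, u + 1)
    else svTallyGo rest (t + 1, r, b, u)

def summary_verdict_py_alt (verdicts : List String) : String :=
  let c := svTallyGo verdicts (0, 0, 0, 0)
  if c.1 = 0 then "no"
  else if c.2.1 = c.1 then "yes"
  else if c.2.2.1 = c.1 then "no"
  else if 0 < c.2.2.2 then "unknown"
  else "partial"

-- ===== PRECONDITION & SPEC =====
def Spec_summary_verdict_py (verdicts : List String) (out : String) : Prop := out = summary_verdict_py_alt verdicts
instance (verdicts : List String) (out : String) : Decidable (Spec_summary_verdict_py verdicts out) := by unfold Spec_summary_verdict_py; infer_instance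

-- ===== CLAIM (what is proved, stated in full; the proofs are below) =====
def Claim_equal_summary_verdict_py : Prop := ∀ (verdicts : List String), Dom_summary_verdict_py verdicts → Spec_summary_verdict_py verdicts (summary_verdict_py verdicts)

-- ===== LEMMAS AND PROOFS =====
theorem svTallyGo_eq (l : List String) :
    ∀ t r b u, svTallyGo l (t, r, b, u)
      = (t + l.length, r + l.countP (· == "reachable"),
         b + l.countP (· == "blocked"), u + l.countP (· == "unknown")) := by
  induction l with
  | nil => simp [svTallyGo]
  | cons x xs ih =>
    intro t r b u
    by_cases hx : x = "reachable"
    · subst hx; simp [svTallyGo, ih]; omega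
    · by_cases hb : x = "blocked"
      · subst hb; simp [svTallyGo, ih]; omega
      · by_cases hu : x = "unknown"
        · subst hu; simp [svTallyGo, ih]; omega
        · simp [svTallyGo, ih, hx, hb, hu]; omega

-- ===== VERDICT (by name: the statement is the Claim_ definition above) =====
theorem summary_verdict_py_spec : Claim_equal_summary_verdict_py := by
  intro verdicts _
  unfold Spec_summary_verdict_py
  simp only [summary_verdict_py, summary_verdict_py_alt, svTallyGo_eq, Nat.zero_add]
  have hr : (verdicts.all (fun value => value == "reachable") = true) ↔
      verdicts.countP (· == "reachable") = verdicts.length := by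
    rw [List.countP_eq_length, List.all_eq_true]
  have hb : (verdicts.all (fun value => value == "blocked") = true) ↔
      verdicts.countP (· == "blocked") = verdicts.length := by
    rw [List.countP_eq_length, List.all_eq_true]
  have hu : (verdicts.any (fun value => value == "unknown") = true) ↔
      0 < verdicts.countP (· == "unknown") := by
    rw [List.countP_pos_iff, List.any_eq_true]
  by_cases h0 : verdicts.isEmpty
  · have : verdicts = [] := List.isEmpty_iff.mp h0
    subst this; simp
  · have hlen : ¬ verdicts.length = 0 := by
      simpa [List.isEmpty_iff, List.length_eq_zero_iff] using h0
    rw [if_neg h0, if_neg hlen]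
    by_cases h1 : verdicts.all (fun value => value == "reachable")
    · rw [if_pos h1, if_pos (hr.mp h1)]
    · rw [if_neg h1, if_neg (fun h => h1 (hr.mpr h))]
      by_cases h2 : verdicts.all (fun value => value == "blocked")
      · rw [if_pos h2, if_pos (hb.mp h2)]
      · rw [if_neg h2, if_neg (fun h => h2 (hb.mpr h))]
        by_cases h3 : verdicts.any (fun value => value == "unknown")
        · rw [if_pos h3, if_pos (hu.mp h3)]
        · rw [if_neg h3, if_neg (fun h => h3 (hu.mpr h))]
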